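-- pv_equiv track=rewrite | github.com/huangzonggui/aki-skills | skills/aki-content-pipeline-pro/scripts/state.py | _recompute_status
-- ===== SOURCE A (Python) =====
-- from typing import Any
--
-- PENDING = "pending"
--
-- RUNNING = "running"
--
-- DONE = "done"
--
-- FAILED = "failed"
--
-- BLOCKED = "blocked"
--
-- SKIPPED = "skipped"
--
-- def _recompute_status(state: dict[str, Any]) -> str:
--     statuses = [row.get("status", PENDING) for row in state.get("steps", {}).values()]
--     if any(status == FAILED for status in statuses):
--         return FAILED
--     if any(status == BLOCKED for status in statuses):
--         return BLOCKED
--     if statuses and all(status in {DONE, SKIPPED} for status in statuses):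
--         return DONE
--     if any(status in {RUNNING, DONE, BLOCKED, SKIPPED} for status in statuses):
--         return RUNNING
--     return PENDING
-- ===== SOURCE B (Python) =====
-- PENDING = "pending"
-- RUNNING = "running"
-- DONE = "done"
-- FAILED = "failed"
-- BLOCKED = "blocked"
-- SKIPPED = "skipped"
--
-- # category bits: FAILED=16, BLOCKED=8, RUNNING=4, DONE/SKIPPED=2, anything else=1
-- def _classify(status):
--     if status == FAILED:
--         return 16
--     if status == BLOCKED:
--         return 8
--     if status == RUNNING:
--         return 4
--     if status in (DONE, SKIPPED):
--         return 2
--     return 1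
--
-- def _recompute_status(state):
--     mask = 0
--     for row in state.get("steps", {}).values():
--         mask |= _classify(row.get("status", PENDING))
--     if mask & 16:
--         return FAILED
--     if mask & 8:
--         return BLOCKED
--     if mask == 2:
--         return DONE
--     if mask & 6:
--         return RUNNING
--     return PENDING
-- ===== Notes on version B (the rewrite author's own statement) =====
-- stated objective: alternative
-- what changed: B makes a single pass that folds each step's status into a 5-bit category bitmask (failed/blocked/running/done-or-skipped/other) and then decides the result by constant-time mask tests, instead of A's four separate any/all rescans of the status list.
import Mathlib
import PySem

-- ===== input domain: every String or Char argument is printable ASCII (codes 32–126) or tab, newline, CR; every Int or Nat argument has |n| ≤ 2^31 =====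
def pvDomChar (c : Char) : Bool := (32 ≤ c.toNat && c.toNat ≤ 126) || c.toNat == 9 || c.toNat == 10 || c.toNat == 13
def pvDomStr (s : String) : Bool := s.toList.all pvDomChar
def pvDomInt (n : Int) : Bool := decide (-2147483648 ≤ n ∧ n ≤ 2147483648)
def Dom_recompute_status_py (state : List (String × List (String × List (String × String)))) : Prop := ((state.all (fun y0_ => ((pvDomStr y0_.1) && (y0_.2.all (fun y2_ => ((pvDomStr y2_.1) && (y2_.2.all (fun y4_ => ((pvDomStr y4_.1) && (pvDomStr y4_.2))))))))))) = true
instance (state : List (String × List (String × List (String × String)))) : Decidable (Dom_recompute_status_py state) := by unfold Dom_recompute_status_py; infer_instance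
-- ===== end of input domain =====

-- B replaces A's four any/all rescans by a single pass folding each status into a 5-bit
-- category bitmask, decided afterwards by constant-time mask tests (objective: alternative).

-- ===== PORT A =====
def recompute_status_py (state : List (String × List (String × List (String × String)))) : String :=
  let statuses :=
    (PySem.Dict.values (PySem.Dict.mk (PySem.Dict.getD (PySem.Dict.mk state) "steps" []))).map
      (fun row => PySem.Dict.getD (PySem.Dict.mk row) "status" "pending")
  if statuses.any (fun s => s == "failed") then "failed"
  else if statuses.any (fun s => s == "blocked") then "blocked"
  else if (!statuses.isEmpty) && statuses.all (fun s => s == "done" || s == "skipped") then "done"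
  else if statuses.any (fun s => s == "running" || s == "done" || s == "blocked" || s == "skipped") then "running"
  else "pending"

-- ===== PORT B =====
-- category bits: failed=16, blocked=8, running=4, done/skipped=2, anything else=1
def pvClassify (status : String) : Nat :=
  if status == "failed" then 16
  else if status == "blocked" then 8
  else if status == "running" then 4
  else if status == "done" || status == "skipped" then 2
  else 1

def recompute_status_py_alt (state : List (String × List (String × List (String × String)))) : String :=
  let mask :=
    (PySem.Dict.values (PySem.Dict.mk (PySem.Dict.getD (PySem.Dict.mk state) "steps" []))).foldl
      (fun m row => m ||| pvClassify (PySem.Dict.getD (PySem.Dict.mk row) "status" "pending")) 0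
  if mask &&& 16 != 0 then "failed"
  else if mask &&& 8 != 0 then "blocked"
  else if mask == 2 then "done"
  else if mask &&& 6 != 0 then "running"
  else "pending"

-- ===== PRECONDITION & SPEC =====
def Spec_recompute_status_py (state : List (String × List (String × List (String × String)))) (out : String) : Prop := out = recompute_status_py_alt state
instance (state : List (String × List (String × List (String × String)))) (out : String) : Decidable (Spec_recompute_status_py state out) := by unfold Spec_recompute_status_py; infer_instance

-- ===== CLAIM (what is proved, stated in full; the proofs are below) =====
def Claim_equal_recompute_status_py : Prop := ∀ (state : List (String × List (String × List (String × String)))), Dom_recompute_status_py state → Spec_recompute_status_py state (recompute_status_py state)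

-- ===== LEMMAS AND PROOFS =====

def pvOther (s : String) : Bool :=
  !(s == "failed") && !(s == "blocked") && !(s == "running") && !(s == "done" || s == "skipped")

def pvM (a b c d e : Bool) : Nat :=
  (if a then 16 else 0) ||| (if b then 8 else 0) ||| (if c then 4 else 0) |||
  (if d then 2 else 0) ||| (if e then 1 else 0)

theorem pv_step (s : String) (a b c d e : Bool) :
    pvM a b c d e ||| pvClassify s =
    pvM (a || (s == "failed")) (b || (s == "blocked")) (c || (s == "running"))
        (d || (s == "done" || s == "skipped")) (e || pvOther s) := by
  by_cases h1 : s = "failed"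
  · subst h1; revert a b c d e; decide
  by_cases h2 : s = "blocked"
  · subst h2; revert a b c d e; decide
  by_cases h3 : s = "running"
  · subst h3; revert a b c d e; decide
  by_cases h4 : s = "done"
  · subst h4; revert a b c d e; decide
  by_cases h5 : s = "skipped"
  · subst h5; revert a b c d e; decide
  · have e1 : (s == "failed") = false := by simp [h1]
    have e2 : (s == "blocked") = false := by simp [h2]
    have e3 : (s == "running") = false := by simp [h3]
    have e4 : (s == "done") = false := by simp [h4]
    have e5 : (s == "skipped") = false := by simp [h5]
    simp only [pvClassify, pvOther, e1, e2, e3, e4, e5]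
    revert a b c d e; decide

theorem pv_fold (xs : List String) : ∀ (a b c d e : Bool),
    xs.foldl (fun m s => m ||| pvClassify s) (pvM a b c d e) =
    pvM (a || xs.any (fun s => s == "failed")) (b || xs.any (fun s => s == "blocked"))
        (c || xs.any (fun s => s == "running")) (d || xs.any (fun s => s == "done" || s == "skipped"))
        (e || xs.any pvOther) := by
  induction xs with
  | nil => intro a b c d e; simp
  | cons s xs ih =>
    intro a b c d e
    simp only [List.foldl_cons]
    rw [pv_step, ih]
    simp [List.any_cons, Bool.or_assoc]

theorem pv_any_or (xs : List String) (p q : String → Bool) :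
    xs.any (fun s => p s || q s) = (xs.any p || xs.any q) := by
  induction xs with
  | nil => rfl
  | cons s xs ih =>
    simp only [List.any_cons]
    rw [ih]
    cases hp : p s <;> cases hq : q s <;> cases ha : xs.any p <;> cases hb : xs.any q <;> rfl

theorem pv_point_notD :
    (fun s : String => !(s == "done" || s == "skipped")) =
    (fun s => (s == "failed") || ((s == "blocked") || ((s == "running") || pvOther s))) := by
  funext s
  by_cases h1 : s = "failed"
  · subst h1; decide
  by_cases h2 : s = "blocked"
  · subst h2; decide
  by_cases h3 : s = "running"
  · subst h3; decide
  by_cases h4 : s = "done"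
  · subst h4; decide
  by_cases h5 : s = "skipped"
  · subst h5; decide
  · have e1 : (s == "failed") = false := by simp [h1]
    have e2 : (s == "blocked") = false := by simp [h2]
    have e3 : (s == "running") = false := by simp [h3]
    have e4 : (s == "done") = false := by simp [h4]
    have e5 : (s == "skipped") = false := by simp [h5]
    simp [pvOther, e1, e2, e3, e4, e5]

theorem pv_point_big :
    (fun s : String => s == "running" || s == "done" || s == "blocked" || s == "skipped") =
    (fun s => (s == "running") || ((s == "blocked") || (s == "done" || s == "skipped"))) := by
  funext s
  cases h1 : s == "running" <;> cases h2 : s == "done" <;> cases h3 : s == "blocked" <;>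
    cases h4 : s == "skipped" <;> rfl

theorem pv_point_cover (s : String) :
    ((s == "failed") || ((s == "blocked") || ((s == "running") ||
      ((s == "done" || s == "skipped") || pvOther s)))) = true := by
  by_cases h1 : s = "failed"
  · subst h1; decide
  by_cases h2 : s = "blocked"
  · subst h2; decide
  by_cases h3 : s = "running"
  · subst h3; decide
  by_cases h4 : s = "done"
  · subst h4; decide
  by_cases h5 : s = "skipped"
  · subst h5; decide
  · have e1 : (s == "failed") = false := by simp [h1]
    have e2 : (s == "blocked") = false := by simp [h2]
    have e3 : (s == "running") = false := by simp [h3]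
    have e4 : (s == "done") = false := by simp [h4]
    have e5 : (s == "skipped") = false := by simp [h5]
    simp [pvOther, e1, e2, e3, e4, e5]

theorem pv_cover (s0 : String) (xs : List String) :
    ((s0 :: xs).any (fun s => s == "failed") || ((s0 :: xs).any (fun s => s == "blocked") ||
      ((s0 :: xs).any (fun s => s == "running") ||
        ((s0 :: xs).any (fun s => s == "done" || s == "skipped") || (s0 :: xs).any pvOther)))) = true := by
  have h := pv_point_cover s0
  simp only [List.any_cons]
  simp only [Bool.or_eq_true] at h ⊢
  tauto

theorem pv_allD (xs : List String) :
    xs.all (fun s => s == "done" || s == "skipped") =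
      !(xs.any (fun s => s == "failed") || (xs.any (fun s => s == "blocked") ||
        (xs.any (fun s => s == "running") || xs.any pvOther))) := by
  rw [List.all_eq_not_any_not, pv_point_notD]
  simp only [pv_any_or]

theorem pv_main (xs : List String) :
    (if xs.any (fun s => s == "failed") then "failed"
     else if xs.any (fun s => s == "blocked") then "blocked"
     else if (!xs.isEmpty) && xs.all (fun s => s == "done" || s == "skipped") then "done"
     else if xs.any (fun s => s == "running" || s == "done" || s == "blocked" || s == "skipped") then "running"
     else "pending")
    = (let mask := xs.foldl (fun m s => m ||| pvClassify s) 0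
       if mask &&& 16 != 0 then "failed"
       else if mask &&& 8 != 0 then "blocked"
       else if mask == 2 then "done"
       else if mask &&& 6 != 0 then "running"
       else "pending") := by
  cases xs with
  | nil => decide
  | cons s0 tl =>
    have hcov := pv_cover s0 tl
    have h0 : (0 : Nat) = pvM false false false false false := rfl
    rw [h0, pv_fold]
    simp only [Bool.false_or]
    rw [pv_allD, pv_point_big]
    simp only [pv_any_or] at hcov ⊢
    rw [show (s0 :: tl).isEmpty = false from rfl]
    revert hcov
    generalize ((s0 :: tl).any (fun s => s == "failed")) = A
    generalize ((s0 :: tl).any (fun s => s == "blocked")) = B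
    generalize ((s0 :: tl).any (fun s => s == "running")) = C
    generalize ((s0 :: tl).any (fun s => s == "done")) = D1
    generalize ((s0 :: tl).any (fun s => s == "skipped")) = D2
    generalize ((s0 :: tl).any pvOther) = E
    revert A B C D1 D2 E
    decide

-- ===== VERDICT (by name: the statement is the Claim_ definition above) =====
theorem recompute_status_py_spec : Claim_equal_recompute_status_py := by
  intro state _
  unfold Spec_recompute_status_py recompute_status_py recompute_status_py_alt
  have h := pv_main
    (((PySem.Dict.values (PySem.Dict.mk (PySem.Dict.getD (PySem.Dict.mk state) "steps" []))).map
      (fun row => PySem.Dict.getD (PySem.Dict.mk row) "status" "pending")))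
  rw [List.foldl_map] at h
  exact h
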